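-- pv_equiv track=rewrite | github.com/Nyle-yao/xhs | xhs/scraper.py | _is_bad_image_url
-- ===== SOURCE A (Python) =====
-- def _is_bad_image_url(url: str) -> bool:
--     u = (url or "").lower()
--     bad_signals = [
--         "/fe-platform/",
--         "avatar",
--         "emoji",
--         "icon",
--         "logo",
--         "badge",
--         "sprite",
--         "favicon",
--         "/comment/",
--     ]
--     return any(x in u for x in bad_signals)
-- ===== SOURCE B (Python) =====
-- # Single left-to-right scan with a first-character dispatch table (Aho-Corasick-lite)
-- # instead of nine independent full substring searches.
-- _BY_FIRST = {
--     "/": ("/fe-platform/", "/comment/"),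
--     "a": ("avatar",),
--     "e": ("emoji",),
--     "i": ("icon",),
--     "l": ("logo",),
--     "b": ("badge",),
--     "s": ("sprite",),
--     "f": ("favicon",),
-- }
--
-- def _is_bad_image_url(url: str) -> bool:
--     u = (url or "").lower()
--     for i, ch in enumerate(u):
--         for sig in _BY_FIRST.get(ch, ()):
--             if u.startswith(sig, i):
--                 return True
--     return False
-- ===== Notes on version B (the rewrite author's own statement) =====
-- stated objective: alternative
-- what changed: Replaces nine independent full substring searches over the lowered URL by one left-to-right scan that at each position dispatches on the current character through a first-letter table and checks only the matching signals as prefixes.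
import Mathlib
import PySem

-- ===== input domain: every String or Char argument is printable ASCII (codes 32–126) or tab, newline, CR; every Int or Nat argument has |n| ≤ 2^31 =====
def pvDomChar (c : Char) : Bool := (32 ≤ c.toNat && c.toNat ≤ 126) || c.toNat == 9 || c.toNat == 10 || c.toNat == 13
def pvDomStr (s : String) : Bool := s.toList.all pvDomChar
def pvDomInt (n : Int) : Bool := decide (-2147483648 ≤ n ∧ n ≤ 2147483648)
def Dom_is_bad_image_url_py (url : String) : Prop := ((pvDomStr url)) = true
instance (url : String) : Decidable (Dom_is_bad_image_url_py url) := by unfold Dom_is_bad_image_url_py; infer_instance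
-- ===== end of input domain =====

-- B replaces A's nine independent substring searches by one left-to-right scan with a
-- first-character dispatch table (objective: alternative algorithm, same asymptotic cost).

-- ===== PORT A =====
def pvBadSignals : List String :=
  ["/fe-platform/", "avatar", "emoji", "icon", "logo", "badge", "sprite", "favicon", "/comment/"]

def is_bad_image_url_py (url : String) : Bool :=
  let u := PySem.Str.lower (if url = "" then "" else url)   -- (url or "").lower()
  pvBadSignals.any (fun x => PySem.Str.isIn x u)            -- any(x in u for x in bad_signals)

-- ===== PORT B =====
-- _BY_FIRST.get(ch, ()) : first-character dispatch table
def pvCandidates (c : Char) : List (List Char) :=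
  if c = '/' then ["/fe-platform/".toList, "/comment/".toList]
  else if c = 'a' then ["avatar".toList]
  else if c = 'e' then ["emoji".toList]
  else if c = 'i' then ["icon".toList]
  else if c = 'l' then ["logo".toList]
  else if c = 'b' then ["badge".toList]
  else if c = 's' then ["sprite".toList]
  else if c = 'f' then ["favicon".toList]
  else []

-- the scan: 'for i, ch in enumerate(u): for sig in _BY_FIRST.get(ch, ()): if u.startswith(sig, i) …'
-- (u.startswith(sig, i) checks sig against the suffix starting at i, which is the suffix recursed on)
def pvScan : List Char → Bool
  | [] => false
  | c :: rest =>
      if (pvCandidates c).any (fun sig => PySem.Chars.startswith (c :: rest) sig) then true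
      else pvScan rest

def is_bad_image_url_py_alt (url : String) : Bool :=
  pvScan (PySem.Str.lower (if url = "" then "" else url)).toList

-- ===== PRECONDITION & SPEC =====
def Spec_is_bad_image_url_py (url : String) (out : Bool) : Prop := out = is_bad_image_url_py_alt url
instance (url : String) (out : Bool) : Decidable (Spec_is_bad_image_url_py url out) := by unfold Spec_is_bad_image_url_py; infer_instance

-- ===== CLAIM (what is proved, stated in full; the proofs are below) =====
def Claim_equal_is_bad_image_url_py : Prop := ∀ (url : String), Dom_is_bad_image_url_py url → Spec_is_bad_image_url_py url (is_bad_image_url_py url)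

-- ===== LEMMAS AND PROOFS =====

-- every table entry is one of the nine signals (as char lists)
lemma pvCandidates_mem {c : Char} {s : List Char} (h : s ∈ pvCandidates c) :
    ∃ x ∈ pvBadSignals, x.toList = s := by
  unfold pvCandidates at h
  split_ifs at h <;> (simp_all [pvBadSignals]; try tauto)

lemma pvPrefix_head_eq {l t : List Char} {c : Char} (h : l <+: c :: t) (hne : l ≠ []) :
    l.head? = some c := by
  obtain ⟨s, hs⟩ := h
  cases l with
  | nil => exact absurd rfl hne
  | cons a l' => simp only [List.cons_append, List.cons.injEq] at hs; simp [hs.1]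

-- a signal whose first character is c and which sits in the table row of c is found by the dispatch
lemma pvDispatch {x : String} {c0 : Char} (hh : x.toList.head? = some c0)
    (hm : x.toList ∈ pvCandidates c0) {c : Char} {rest : List Char}
    (hpre : x.toList <+: c :: rest) :
    (pvCandidates c).any (fun sig => PySem.Chars.startswith (c :: rest) sig) = true := by
  have hne : x.toList ≠ [] := by intro h0; rw [h0] at hh; cases hh
  have hc := pvPrefix_head_eq hpre hne
  rw [hh] at hc
  obtain rfl : c0 = c := Option.some.inj hc
  exact List.any_eq_true.mpr ⟨_, hm, (PySem.Chars.startswith_iff _ _).mpr hpre⟩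

-- a signal that is a prefix of c :: rest is found by the dispatch at c
lemma pvCandidates_complete {x : String} (hx : x ∈ pvBadSignals) {c : Char} {rest : List Char}
    (hpre : x.toList <+: c :: rest) :
    (pvCandidates c).any (fun sig => PySem.Chars.startswith (c :: rest) sig) = true := by
  simp only [pvBadSignals, List.mem_cons, List.not_mem_nil, or_false] at hx
  rcases hx with h | h | h | h | h | h | h | h | h <;> subst h
  · exact pvDispatch (c0 := '/') (by decide) (by decide) hpre
  · exact pvDispatch (c0 := 'a') (by decide) (by decide) hpre
  · exact pvDispatch (c0 := 'e') (by decide) (by decide) hpre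
  · exact pvDispatch (c0 := 'i') (by decide) (by decide) hpre
  · exact pvDispatch (c0 := 'l') (by decide) (by decide) hpre
  · exact pvDispatch (c0 := 'b') (by decide) (by decide) hpre
  · exact pvDispatch (c0 := 's') (by decide) (by decide) hpre
  · exact pvDispatch (c0 := 'f') (by decide) (by decide) hpre
  · exact pvDispatch (c0 := '/') (by decide) (by decide) hpre

-- characterisation of the scan: it finds exactly the signals occurring as infixes
lemma pvScan_iff (cs : List Char) :
    pvScan cs = true ↔ ∃ x ∈ pvBadSignals, x.toList <:+: cs := by
  induction cs with
  | nil => simp [pvScan, List.infix_nil, pvBadSignals]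
  | cons c rest ih =>
    unfold pvScan
    constructor
    · intro h
      split_ifs at h with hc
      · simp only [List.any_eq_true] at hc
        obtain ⟨s, hs, hsw⟩ := hc
        obtain ⟨x, hx, rfl⟩ := pvCandidates_mem hs
        exact ⟨x, hx, ((PySem.Chars.startswith_iff _ _).mp hsw).isInfix⟩
      · obtain ⟨x, hx, hin⟩ := ih.mp h
        exact ⟨x, hx, hin.trans (rest.suffix_cons c).isInfix⟩
    · rintro ⟨x, hx, hin⟩
      rcases List.infix_cons_iff.mp hin with hpre | hinf
      · simp [pvCandidates_complete hx hpre]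
      · split_ifs with hc
        · rfl
        · exact ih.mpr ⟨x, hx, hinf⟩

-- ===== VERDICT (by name: the statement is the Claim_ definition above) =====
theorem is_bad_image_url_py_spec : Claim_equal_is_bad_image_url_py := by
  intro url _
  unfold Spec_is_bad_image_url_py is_bad_image_url_py is_bad_image_url_py_alt
  rw [Bool.eq_iff_iff, pvScan_iff]
  simp [List.any_eq_true, PySem.Chars.isIn_iff_infix]
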